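-- pv_equiv track=rewrite | github.com/scylladb/scylla-ccm | ccmlib/scylla_node.py | process_opts
-- ===== SOURCE A (Python) =====
-- from collections import OrderedDict
--
-- OPTION_ALIASES = {
--     '-c': '--smp',
--     '-m': '--memory',
-- }
--
-- def process_opts(opts):
--     """
--     Process command line options, normalizing short form to long form.
--
--     Parses command line options that show up either like "--foo value-of-foo"
--     or as a single option like "--yes-i-insist". Short options (-c, -m) are
--     normalized to their long form equivalents (--smp, --memory).
--
--     Args:
--         opts: List of command line option strings
--
--     Returns:
--         OrderedDict mapping option keys to lists of values
--     """
--     ext_args = OrderedDict()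
--     opts_i = 0
--     while opts_i < len(opts):
--         # the command line options show up either like "--foo value-of-foo"
--         # or as a single option like --yes-i-insist
--         assert opts[opts_i].startswith('-')
--         o = opts[opts_i]
--         opts_i += 1
--         if '=' in o:
--             key, val = o.split('=', 1)
--         else:
--             key = o
--             vals = []
--             while opts_i < len(opts) and not opts[opts_i].startswith('-'):
--                 vals.append(opts[opts_i])
--                 opts_i += 1
--             val = ' '.join(vals)
--         # Normalize short option aliases to their long form
--         key = OPTION_ALIASES.get(key, key)
--         if not key.startswith("--scylla-manager"):
--             ext_args.setdefault(key, []).append(val)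
--     return ext_args
-- ===== SOURCE B (Python) =====
-- from collections import OrderedDict
--
-- OPTION_ALIASES = {
--     '-c': '--smp',
--     '-m': '--memory',
-- }
--
-- def process_opts(opts):
--     """Single forward pass: carry a pending key and its collected values,
--     flushing whenever a new dash-token (or the end of input) is reached."""
--     ext_args = OrderedDict()
--
--     def emit(key, val):
--         key = OPTION_ALIASES.get(key, key)
--         if not key.startswith("--scylla-manager"):
--             ext_args.setdefault(key, []).append(val)
--
--     pending = None
--     vals = []
--     for tok in opts:
--         if tok.startswith('-'):
--             if pending is not None:
--                 emit(pending, ' '.join(vals))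
--                 pending, vals = None, []
--             if '=' in tok:
--                 k, v = tok.split('=', 1)
--                 emit(k, v)
--             else:
--                 pending, vals = tok, []
--         else:
--             assert pending is not None
--             vals.append(tok)
--     if pending is not None:
--         emit(pending, ' '.join(vals))
--     return ext_args
-- ===== Notes on version B (the rewrite author's own statement) =====
-- stated objective: alternative
-- what changed: Replaced the index-based while-loop with an inner lookahead loop by a single forward pass over the tokens that carries a pending key and its collected values as explicit state, flushing on each new dash-token and at the end.
import Mathlib
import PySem

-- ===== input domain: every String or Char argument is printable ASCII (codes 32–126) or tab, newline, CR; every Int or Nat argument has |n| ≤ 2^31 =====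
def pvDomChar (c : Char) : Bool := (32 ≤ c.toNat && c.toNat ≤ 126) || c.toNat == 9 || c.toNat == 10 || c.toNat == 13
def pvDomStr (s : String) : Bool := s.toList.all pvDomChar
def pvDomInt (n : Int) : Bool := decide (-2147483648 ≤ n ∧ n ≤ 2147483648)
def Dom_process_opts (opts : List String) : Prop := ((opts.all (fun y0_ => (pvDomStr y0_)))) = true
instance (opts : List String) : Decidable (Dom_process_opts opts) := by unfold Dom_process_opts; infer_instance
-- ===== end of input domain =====

-- B replaces A's index-based lookahead while-loop by a single forward pass with
-- explicit pending-key state (objective: alternative decomposition, same cost).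
-- Pre_ excludes exactly the inputs where A's `assert` raises AssertionError
-- (a non-dash token at an option-group start); B raises there too.

-- ===== PORT A =====
def OPTION_ALIASES : PySem.Dict String String :=
  PySem.Dict.ofList [("-c", "--smp"), ("-m", "--memory")]

-- inner while-loop of A: collect value tokens until a dash token (or the end)
def pvInnerA : List String → List String × List String
  | [] => ([], [])
  | t :: rest =>
      if PySem.Str.startswith t "-" then ([], t :: rest)
      else
        let p := pvInnerA rest
        (t :: p.1, p.2)

theorem pvInnerA_len : ∀ (l : List String), (pvInnerA l).2.length ≤ l.length
  | [] => by simp [pvInnerA]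
  | t :: rest => by
      simp only [pvInnerA]
      split
      · simp
      · simpa using Nat.le_succ_of_le (pvInnerA_len rest)

-- outer while-loop of A
def pvLoopA (d : PySem.Dict String (List String)) :
    List String → PySem.Dict String (List String)
  | [] => d
  | o :: rest =>
      if PySem.Str.startswith o "-" then
        if PySem.Str.isIn "=" o then
          let ps := (PySem.Str.splitMax? o "=" 1).getD []
          let key := ps.getD 0 ""
          let val := ps.getD 1 ""
          let key := OPTION_ALIASES.getD key key
          let d' := if PySem.Str.startswith key "--scylla-manager" then d
                    else d.modify key [] (fun l => l ++ [val])
          pvLoopA d' rest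
        else
          let p := pvInnerA rest
          let val := PySem.Str.join " " p.1
          let key := OPTION_ALIASES.getD o o
          let d' := if PySem.Str.startswith key "--scylla-manager" then d
                    else d.modify key [] (fun l => l ++ [val])
          pvLoopA d' p.2
      else d  -- Python: assert fails (AssertionError); excluded by Pre_
  termination_by l => l.length
  decreasing_by
  · simp
  · simpa using Nat.lt_succ_of_le (pvInnerA_len rest)

def process_opts (opts : List String) : List (String × List String) :=
  (pvLoopA PySem.Dict.empty opts).items

-- ===== PORT B =====
-- Source B's `emit` helper: alias-normalize, filter, setdefault-append
def pvEmitB (d : PySem.Dict String (List String)) (key val : String) :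
    PySem.Dict String (List String) :=
  let key := OPTION_ALIASES.getD key key
  if PySem.Str.startswith key "--scylla-manager" then d
  else d.modify key [] (fun l => l ++ [val])

-- loop state: (dict so far, pending key, collected values)
def pvStepB (st : PySem.Dict String (List String) × Option String × List String)
    (tok : String) : PySem.Dict String (List String) × Option String × List String :=
  if PySem.Str.startswith tok "-" then
    let d := match st.2.1 with
             | some k => pvEmitB st.1 k (PySem.Str.join " " st.2.2)
             | none => st.1
    if PySem.Str.isIn "=" tok then
      let ps := (PySem.Str.splitMax? tok "=" 1).getD []
      (pvEmitB d (ps.getD 0 "") (ps.getD 1 ""), none, [])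
    else
      (d, some tok, [])
  else
    match st.2.1 with
    | some k => (st.1, some k, st.2.2 ++ [tok])
    | none => st  -- Python: assert fails (AssertionError); excluded by Pre_

def pvFlushB (st : PySem.Dict String (List String) × Option String × List String) :
    PySem.Dict String (List String) :=
  match st.2.1 with
  | some k => pvEmitB st.1 k (PySem.Str.join " " st.2.2)
  | none => st.1

def process_opts_alt (opts : List String) : List (String × List String) :=
  (pvFlushB (opts.foldl pvStepB (PySem.Dict.empty, none, []))).items

-- ===== PRECONDITION & SPEC =====
-- Pre_ excludes exactly the inputs on which A raises AssertionError: a first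
-- token not starting with '-', or a non-dash token right after a '='-option.
def Pre_process_opts (opts : List String) : Prop :=
  (match opts with
   | [] => true
   | h :: _ => PySem.Str.startswith h "-") = true ∧
  List.IsChain (fun x y =>
    (!(PySem.Str.startswith x "-" && PySem.Str.isIn "=" x)
      || PySem.Str.startswith y "-") = true) opts

instance (opts : List String) : Decidable (Pre_process_opts opts) := by
  unfold Pre_process_opts; infer_instance

def pvWitness_process_opts : List String :=
  ["--foo=1", "--bar", "a", "b", "-c", "4"]

def Spec_process_opts (opts : List String) (out : List (String × List String)) : Prop :=
  out = process_opts_alt opts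
instance (opts : List String) (out : List (String × List String)) :
    Decidable (Spec_process_opts opts out) := by unfold Spec_process_opts; infer_instance

-- ===== CLAIM (what is proved, stated in full; the proofs are below) =====
def Claim_equal_process_opts : Prop :=
  ∀ (opts : List String), Dom_process_opts opts → Pre_process_opts opts →
    Spec_process_opts opts (process_opts opts)

-- ===== LEMMAS AND PROOFS =====

-- abbreviations used only by the proofs
def pvChain (l : List String) : Prop :=
  List.IsChain (fun x y =>
    (!(PySem.Str.startswith x "-" && PySem.Str.isIn "=" x)
      || PySem.Str.startswith y "-") = true) l

def pvHeadDash : List String → Bool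
  | [] => true
  | h :: _ => PySem.Str.startswith h "-"

-- part 1 statement: at a group start (no pending key), B's fold+flush equals A's loop
def pvP1 (l : List String) : Prop :=
  pvChain l → pvHeadDash l = true →
  ∀ d, pvFlushB (l.foldl pvStepB (d, none, [])) = pvLoopA d l

-- part 2: with a pending key, B's fold+flush equals A's inner-loop + emit + loop
def pvP2 (l : List String) : Prop :=
  pvChain l →
  ∀ d k vals, pvFlushB (l.foldl pvStepB (d, some k, vals)) =
    pvLoopA (pvEmitB d k (PySem.Str.join " " (vals ++ (pvInnerA l).1))) (pvInnerA l).2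

theorem pvP2_of_P1 (M : Nat) (H1 : ∀ l : List String, l.length ≤ M → pvP1 l) :
    ∀ l : List String, l.length ≤ M → pvP2 l := by
  intro l
  induction l with
  | nil =>
      intro _ _ d k vals
      simp [pvFlushB, pvInnerA, pvLoopA]
  | cons t rest ih =>
      intro hlen hch d k vals
      by_cases hd : PySem.Chars.startswith t.toList ['-'] = true
      · -- flush, then the dash token restarts a group: use part 1 on t :: rest
        have h1 := H1 (t :: rest) hlen hch (by simpa [pvHeadDash] using hd)
        have hstep : pvStepB (d, some k, vals) t
            = pvStepB (pvEmitB d k (PySem.Str.join " " vals), none, []) t := by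
          simp [pvStepB, hd]
        simp only [List.foldl_cons, hstep]
        rw [show (List.foldl pvStepB
              (pvStepB (pvEmitB d k (PySem.Str.join " " vals), none, []) t) rest)
            = List.foldl pvStepB (pvEmitB d k (PySem.Str.join " " vals), none, [])
                (t :: rest) from rfl]
        rw [h1]
        simp [pvInnerA, hd]
      · -- value token: append to vals
        have hch' : pvChain rest := hch.of_cons
        have ih' := ih (by simpa using Nat.le_of_succ_le hlen) hch' d k (vals ++ [t])
        have hstep : pvStepB (d, some k, vals) t = (d, some k, vals ++ [t]) := by
          simp [pvStepB, hd]
        simp only [List.foldl_cons, hstep]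
        rw [ih']
        simp [pvInnerA, hd]

theorem pvP1_all : ∀ (n : Nat) (l : List String), l.length ≤ n → pvP1 l := by
  intro n
  induction n with
  | zero =>
      intro l hlen
      have : l = [] := List.eq_nil_of_length_eq_zero (Nat.le_zero.mp hlen)
      subst this
      intro _ _ d; simp [pvFlushB, pvLoopA]
  | succ n ih =>
      intro l hlen
      match l with
      | [] => intro _ _ d; simp [pvFlushB, pvLoopA]
      | o :: rest =>
        intro hch hhd d
        have hd : PySem.Chars.startswith o.toList ['-'] = true := by
          simpa [pvHeadDash] using hhd
        have hlr : rest.length ≤ n := by simpa using Nat.le_of_succ_le_succ hlen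
        have hch' : pvChain rest := hch.of_cons
        by_cases he : PySem.Chars.isIn ['='] o.toList = true
        · -- '=' option: emitted immediately; rest starts a new group
          have hhd' : pvHeadDash rest = true := by
            cases rest with
            | nil => rfl
            | cons y t =>
                have := (List.isChain_cons_cons.mp hch).1
                simpa [pvHeadDash, hd, he] using this
          have ih' := ih rest hlr hch' hhd'
          have hstep : pvStepB (d, none, []) o
              = (pvEmitB d (((PySem.Str.splitMax? o "=" 1).getD []).getD 0 "")
                  (((PySem.Str.splitMax? o "=" 1).getD []).getD 1 ""), none, []) := by
            simp [pvStepB, hd, he]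
          simp only [List.foldl_cons, hstep]
          rw [ih' _]
          simp [pvLoopA, pvEmitB, hd, he]
        · -- bare key: pending state; use part 2 on rest
          have h2 := pvP2_of_P1 n (fun l2 hl2 => ih l2 hl2) rest hlr hch' d o []
          have hstep : pvStepB (d, none, []) o = (d, some o, []) := by
            simp [pvStepB, hd, he]
          simp only [List.foldl_cons, hstep]
          rw [h2]
          simp [pvLoopA, pvEmitB, hd, he]
          rfl

-- ===== VERDICT (by name: the statement is the Claim_ definition above) =====
theorem process_opts_spec : Claim_equal_process_opts := by
  unfold Claim_equal_process_opts
  intro opts _ hpre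
  unfold Spec_process_opts process_opts process_opts_alt
  have h := pvP1_all opts.length opts (Nat.le_refl _) hpre.2
    (by
      cases opts with
      | nil => rfl
      | cons h t => simpa [pvHeadDash] using hpre.1)
    PySem.Dict.empty
  rw [h]
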